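-- pv_equiv track=rewrite | github.com/chritzadz/coding_problems | kembalian.py | kurang
-- ===== SOURCE A (Python) =====
-- def base7(price):
--     list = []
--     while price > 0:
--         list.append(price%7)
--         price = price // 7
--     return list
--
-- def kurang(price):
--     base_list = base7(price)
--     list = base7(price)
--     for i in range(len(list)):
--         list[i] = base_list[i]-1 if base_list[i] != 0 else 0
--
--     kurang = 0
--     for i in range(len(base_list)):
--         kurang += 7**i*list[i]
--     return kurang
-- ===== SOURCE B (Python) =====
-- def kurang(price):
--     total = 0
--     power = 1
--     while price > 0:
--         d = price % 7
--         if d != 0: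
--             total += (d - 1) * power
--         power *= 7
--         price //= 7
--     return total
-- ===== Notes on version B (the rewrite author's own statement) =====
-- stated objective: simpler
-- what changed: Replaced the two digit-list constructions, the index-based decrement loop and the power-sum reconstruction loop by one arithmetic pass that peels base-seven digits with modulus and floor division while maintaining an accumulator and a running place value, using no lists at all.
import Mathlib
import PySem

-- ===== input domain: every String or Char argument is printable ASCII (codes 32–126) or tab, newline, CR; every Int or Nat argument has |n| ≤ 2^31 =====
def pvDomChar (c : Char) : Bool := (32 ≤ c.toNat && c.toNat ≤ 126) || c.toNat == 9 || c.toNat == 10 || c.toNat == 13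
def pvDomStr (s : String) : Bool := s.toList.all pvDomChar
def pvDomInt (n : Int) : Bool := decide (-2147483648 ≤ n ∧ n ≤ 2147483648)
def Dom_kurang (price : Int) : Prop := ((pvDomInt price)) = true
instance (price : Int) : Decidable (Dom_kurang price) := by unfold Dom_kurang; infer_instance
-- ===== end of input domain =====

-- B fuses A's digit-list construction, decrement loop and reconstruction loop into one
-- arithmetic pass over the base-7 digits (objective: simpler, no lists).


-- ===== PORT A =====
-- helper base7: while price > 0: append price % 7; price //= 7
def base7 (price : Int) : List Int :=
  if _h : price > 0 then
    PySem.Int.mod price 7 :: base7 (PySem.Int.floordiv price 7)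
  else []
termination_by price.toNat
decreasing_by
  rw [PySem.Int.floordiv_eq_ediv_of_pos (by norm_num)]
  omega

def kurang (price : Int) : Int :=
  let base_list := base7 price
  let list0 := base7 price
  -- for i in range(len(list)): list[i] = base_list[i]-1 if base_list[i] != 0 else 0
  -- (indices are in range, so base_list[i] is ported as getD i 0)
  let list := (List.range list0.length).foldl
    (fun l i => l.set i (if base_list.getD i 0 ≠ 0 then base_list.getD i 0 - 1 else 0)) list0
  -- kurang = 0; for i in range(len(base_list)): kurang += 7**i*list[i]
  (List.range base_list.length).foldl (fun k i => k + 7 ^ i * list.getD i 0) 0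

-- ===== PORT B =====
-- while price > 0: d = price % 7; if d != 0: total += (d-1)*power; power *= 7; price //= 7
def kurangAux (price total power : Int) : Int :=
  if h : price > 0 then
    let d := PySem.Int.mod price 7
    kurangAux (PySem.Int.floordiv price 7)
      (if d ≠ 0 then total + (d - 1) * power else total) (power * 7)
  else total
termination_by price.toNat
decreasing_by
  rw [PySem.Int.floordiv_eq_ediv_of_pos (by norm_num)]
  omega

def kurang_alt (price : Int) : Int := kurangAux price 0 1

-- ===== PRECONDITION & SPEC =====
def Spec_kurang (price : Int) (out : Int) : Prop := out = kurang_alt price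
instance (price : Int) (out : Int) : Decidable (Spec_kurang price out) := by unfold Spec_kurang; infer_instance

-- ===== CLAIM (what is proved, stated in full; the proofs are below) =====
def Claim_equal_kurang : Prop := ∀ (price : Int), Dom_kurang price → Spec_kurang price (kurang price)

-- ===== LEMMAS AND PROOFS =====

-- digit decrement applied to each base-7 digit
def decDigit (d : Int) : Int := if d ≠ 0 then d - 1 else 0

-- weighted base-7 value of a digit list (least significant first)
def wval : List Int → Int
  | [] => 0
  | d :: t => d + 7 * wval t

-- A's index-set loop, run from offset s, rewrites the suffix to the mapped digits
lemma setfold (b : List Int) :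
    ∀ (cnt s : Nat) (l : List Int), s + cnt = l.length → l.length = b.length →
    (List.range' s cnt).foldl
        (fun l i => l.set i (if b.getD i 0 ≠ 0 then b.getD i 0 - 1 else 0)) l
      = l.take s ++ (b.drop s).map decDigit := by
  intro cnt
  induction cnt with
  | zero =>
    intro s l hs hb
    simp only [List.range'_zero, List.foldl_nil]
    rw [List.drop_eq_nil_of_le (by omega : b.length ≤ s), List.take_of_length_le (by omega)]
    simp
  | succ n ih =>
    intro s l hs hb
    have hsl : s < l.length := by omega
    have hsb : s < b.length := by omega
    rw [List.range'_succ, List.foldl_cons,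
        ih (s + 1) _ (by simp; omega) (by simp [hb])]
    rw [List.set_eq_take_append_cons_drop, if_pos hsl]
    rw [List.drop_eq_getElem_cons hsb]
    simp only [List.map_cons]
    rw [List.take_append]
    simp [List.take_take, List.length_take, Nat.min_eq_left (le_of_lt hsl),
      decDigit]
    simp [List.getElem?_eq_getElem hsb]

-- A's reconstruction loop computes the weighted value of the suffix
lemma sumfold (L : List Int) :
    ∀ (cnt s : Nat) (k : Int), s + cnt = L.length →
    (List.range' s cnt).foldl (fun k i => k + 7 ^ i * L.getD i 0) k
      = k + 7 ^ s * wval (L.drop s) := by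
  intro cnt
  induction cnt with
  | zero =>
    intro s k hs
    simp [List.drop_eq_nil_of_le (by omega : L.length ≤ s), wval]
  | succ n ih =>
    intro s k hs
    have hsL : s < L.length := by omega
    rw [List.range'_succ, List.foldl_cons, ih (s + 1) _ (by omega)]
    rw [List.drop_eq_getElem_cons hsL, wval]
    rw [List.getD_eq_getElem _ _ hsL]
    ring

-- B's fused loop computes the weighted value of the decremented digit list
lemma kurangAux_eq (price total power : Int) :
    kurangAux price total power = total + power * wval ((base7 price).map decDigit) := by
  by_cases h : price > 0
  · rw [kurangAux, dif_pos h, base7, dif_pos h]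
    simp only [List.map_cons, wval]
    rw [kurangAux_eq (PySem.Int.floordiv price 7)]
    simp only [decDigit]
    split_ifs <;> ring
  · rw [kurangAux, dif_neg h, base7, dif_neg h]
    simp [wval]
termination_by price.toNat
decreasing_by
  rw [PySem.Int.floordiv_eq_ediv_of_pos (by norm_num)]
  omega

-- ===== VERDICT (by name: the statement is the Claim_ definition above) =====
theorem kurang_spec : Claim_equal_kurang := by
  intro price _
  unfold Spec_kurang kurang kurang_alt
  rw [kurangAux_eq]
  have hset := setfold (base7 price) (base7 price).length 0 (base7 price) (by simp) rfl
  simp only [List.range_eq_range'] at hset ⊢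
  rw [hset]
  simp only [List.take_zero, List.drop_zero, List.nil_append]
  rw [sumfold ((base7 price).map decDigit) (base7 price).length 0 0 (by simp)]
  simp
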